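-- pv_equiv track=rewrite | github.com/ZeroMin-K/Programmers_Coding_Test | level0/개미 군단.py | solution
-- ===== SOURCE A (Python) =====
-- def solution(hp):
--
--     answer = 0
--     # 개미들 공격력 리스트 ants 생성
--     ants = [5, 3, 1]
--
--     # 개미들 공격력 리스트 ants 하나씩 반복하며 => ant
--     for ant in ants:
--         # 현재 개미의 공격력에서 현재 사냥감의 hp로 나눈 몫, 나머지 구하기
--         div, rest = divmod(hp, ant)
--         # 몫은 answer에 넣어서 증가 (개미 수)
--         answer += div
--         # 현재 hp는 나머지
--         hp = rest
--
--     return answer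
-- ===== SOURCE B (Python) =====
-- def solution(hp):
--     # Greedy over attack powers {5,3,1} equals: hp//5 five-ants plus a fixed
--     # lookup of how many extra ants the remainder class hp%5 needs
--     # (0->0, 1->1, 2->2, 3->1, 4->2). No loop, no division by 3.
--     EXTRA = (0, 1, 2, 1, 2)
--     return hp // 5 + EXTRA[hp % 5]
-- ===== Notes on version B (the rewrite author's own statement) =====
-- stated objective: alternative
-- what changed: Replaced the greedy loop of successive divmods over the ant attack powers with a single division by the strongest ant plus a precomputed five-entry lookup table giving the extra ants for each remainder class; no loop and no division by three at all.
import Mathlib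
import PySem

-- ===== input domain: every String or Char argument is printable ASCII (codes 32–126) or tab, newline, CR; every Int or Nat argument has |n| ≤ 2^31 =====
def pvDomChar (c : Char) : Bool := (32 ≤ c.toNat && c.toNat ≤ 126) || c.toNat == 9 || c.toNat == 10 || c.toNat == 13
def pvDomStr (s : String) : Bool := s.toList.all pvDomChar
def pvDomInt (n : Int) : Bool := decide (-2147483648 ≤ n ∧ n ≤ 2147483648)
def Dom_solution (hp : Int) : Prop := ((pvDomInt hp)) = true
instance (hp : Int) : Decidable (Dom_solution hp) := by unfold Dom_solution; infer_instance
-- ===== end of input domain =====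

-- B replaces A's greedy loop of divmods over the ant powers with one division by the strongest ant plus a five-entry lookup table for the remainder class (alternative formulation).


-- ===== PORT A =====
-- loop over the ants list with state (answer, hp); divmod = (floordiv, mod)
def solution (hp : Int) : Int :=
  let st := [(5 : Int), 3, 1].foldl
    (fun (s : Int × Int) ant =>
      let div := PySem.Int.floordiv s.2 ant
      let rest := PySem.Int.mod s.2 ant
      (s.1 + div, rest))
    (0, hp)
  st.1

-- ===== PORT B =====
-- EXTRA[hp % 5]: hp % 5 is always in 0..4 (Python mod with positive divisor), so the
-- tuple index never raises; pyGet?'s none branch is unreachable and defaulted to 0.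
def solution_alt (hp : Int) : Int :=
  let EXTRA : List Int := [0, 1, 2, 1, 2]
  PySem.Int.floordiv hp 5 + (PySem.List.pyGet? EXTRA (PySem.Int.mod hp 5)).getD 0

-- ===== PRECONDITION & SPEC =====
def Spec_solution (hp : Int) (out : Int) : Prop := out = solution_alt hp
instance (hp : Int) (out : Int) : Decidable (Spec_solution hp out) := by unfold Spec_solution; infer_instance

-- ===== CLAIM =====
def Claim_equal_solution : Prop := ∀ (hp : Int), Dom_solution hp → Spec_solution hp (solution hp)

-- ===== LEMMAS AND PROOFS =====
-- For r = hp % 5 ∈ [0,5): the tail of A's greedy loop (r//3 + r%3) equals the table entry.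
theorem pv_tail_eq (r : Int) (h0 : 0 ≤ r) (h5 : r < 5) :
    PySem.Int.floordiv r 3 + PySem.Int.mod r 3
      = (PySem.List.pyGet? [(0:Int), 1, 2, 1, 2] r).getD 0 := by
  interval_cases r <;> decide

-- ===== VERDICT =====
theorem solution_spec : Claim_equal_solution := by
  intro hp _
  unfold Spec_solution solution solution_alt
  simp only [List.foldl]
  have hmod : PySem.Int.mod (PySem.Int.mod hp 5) 1 = 0 := by
    simp [PySem.Int.mod]
  have hdiv1 : ∀ x : Int, PySem.Int.floordiv x 1 = x := by
    intro x
    simp [PySem.Int.floordiv]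
  have hr0 : 0 ≤ PySem.Int.mod hp 5 := by
    rw [PySem.Int.mod_eq_emod_of_pos (by norm_num : (0:Int) < 5)]
    exact Int.emod_nonneg hp (by norm_num)
  have hr5 : PySem.Int.mod hp 5 < 5 := by
    rw [PySem.Int.mod_eq_emod_of_pos (by norm_num : (0:Int) < 5)]
    exact Int.emod_lt_of_pos hp (by norm_num)
  have := pv_tail_eq (PySem.Int.mod hp 5) hr0 hr5
  simp only [hdiv1] at *
  omega
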